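-- pv_equiv track=rewrite | github.com/rajshivendra2026/TraceMAP-RCA-Workbench | src/correlation/session_builder.py | _session_has_mobility_signal
-- ===== SOURCE A (Python) =====
-- def _all_session_messages(session: dict) -> list:
--     messages = []
--     for key in ("sip_msgs", "dia_msgs", "inap_msgs", "gtp_msgs", "generic_msgs"):
--         messages.extend(session.get(key, []))
--     return messages
--
-- def _session_has_mobility_signal(session: dict) -> bool:
--     keywords = (
--         "HANDOVER",
--         "FORWARD RELOCATION",
--         "MODIFY BEARER",
--         "RELEASE ACCESS BEARERS",
--         "PATH SWITCH",
--         "UE CONTEXT RELEASE",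
--     )
--     for message in _all_session_messages(session):
--         text = str(message.get("message") or "").upper()
--         if any(keyword in text for keyword in keywords):
--             return True
--     return False
-- ===== SOURCE B (Python) =====
-- def _session_has_mobility_signal(session: dict) -> bool:
--     keywords = (
--         "HANDOVER",
--         "FORWARD RELOCATION",
--         "MODIFY BEARER",
--         "RELEASE ACCESS BEARERS",
--         "PATH SWITCH",
--         "UE CONTEXT RELEASE",
--     )
--     parts = []
--     for key in ("sip_msgs", "dia_msgs", "inap_msgs", "gtp_msgs", "generic_msgs"):
--         for message in session.get(key, []):
--             parts.append(str(message.get("message") or "").upper())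
--     blob = "\n".join(parts)
--     return any(keyword in blob for keyword in keywords)
-- ===== Notes on version B (the rewrite author's own statement) =====
-- stated objective: alternative
-- what changed: Instead of testing all six keywords against each message inside the per-message loop, B first gathers every normalized message text into one newline-joined blob and then tests each keyword exactly once against the blob (gather-then-scan; no keyword contains a newline, so no cross-message match can arise).
import Mathlib
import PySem

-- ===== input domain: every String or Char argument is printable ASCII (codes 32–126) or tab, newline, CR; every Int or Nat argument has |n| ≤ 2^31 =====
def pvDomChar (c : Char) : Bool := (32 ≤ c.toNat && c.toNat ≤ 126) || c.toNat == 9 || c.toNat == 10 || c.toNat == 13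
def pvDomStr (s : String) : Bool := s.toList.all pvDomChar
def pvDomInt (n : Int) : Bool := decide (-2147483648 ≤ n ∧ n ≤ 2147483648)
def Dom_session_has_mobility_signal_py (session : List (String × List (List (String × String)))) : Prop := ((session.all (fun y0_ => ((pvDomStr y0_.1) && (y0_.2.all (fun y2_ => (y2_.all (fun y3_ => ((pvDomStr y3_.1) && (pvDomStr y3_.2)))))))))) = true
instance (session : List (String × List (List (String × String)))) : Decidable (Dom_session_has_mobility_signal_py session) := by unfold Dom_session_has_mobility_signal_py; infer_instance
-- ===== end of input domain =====

-- B gathers all normalized message texts into one newline-joined blob and tests each keyword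
-- once against the blob, instead of testing every keyword against every message (alternative
-- decomposition, same exact result; no keyword contains a newline).

-- ===== PORT A =====
def pvMsgKeys : List String := ["sip_msgs", "dia_msgs", "inap_msgs", "gtp_msgs", "generic_msgs"]

def pvKeywords : List String :=
  ["HANDOVER", "FORWARD RELOCATION", "MODIFY BEARER",
   "RELEASE ACCESS BEARERS", "PATH SWITCH", "UE CONTEXT RELEASE"]

-- _all_session_messages: messages.extend(session.get(key, [])) over the five keys
def pvAllSessionMessages (session : List (String × List (List (String × String)))) :
    List (List (String × String)) :=
  pvMsgKeys.foldl (fun messages key => messages ++ (PySem.Dict.mk session).getD key []) []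

-- text = str(message.get("message") or "").upper()
-- ('or ""' maps None to ""; on a present string value "" it yields "" as well, the same value, so getD "" is exact)
def pvMsgText (message : List (String × String)) : String :=
  PySem.Str.upper (((PySem.Dict.mk message).get? "message").getD "")

-- the for-loop with early 'return True' = List.any over the messages
def session_has_mobility_signal_py (session : List (String × List (List (String × String)))) : Bool :=
  (pvAllSessionMessages session).any
    (fun message => pvKeywords.any (fun keyword => PySem.Str.isIn keyword (pvMsgText message)))

-- ===== PORT B =====
def session_has_mobility_signal_py_alt (session : List (String × List (List (String × String)))) : Bool :=
  let parts := pvMsgKeys.foldl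
    (fun parts key => parts ++ ((PySem.Dict.mk session).getD key []).map pvMsgText) []
  let blob := PySem.Str.join "\n" parts
  pvKeywords.any (fun keyword => PySem.Str.isIn keyword blob)

-- ===== PRECONDITION & SPEC =====
def Spec_session_has_mobility_signal_py (session : List (String × List (List (String × String)))) (out : Bool) : Prop := out = session_has_mobility_signal_py_alt session
instance (session : List (String × List (List (String × String)))) (out : Bool) : Decidable (Spec_session_has_mobility_signal_py session out) := by unfold Spec_session_has_mobility_signal_py; infer_instance

-- ===== CLAIM (what is proved, stated in full; the proofs are below) =====
def Claim_equal_session_has_mobility_signal_py : Prop := ∀ (session : List (String × List (List (String × String)))), Dom_session_has_mobility_signal_py session → Spec_session_has_mobility_signal_py session (session_has_mobility_signal_py session)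

-- ===== LEMMAS AND PROOFS =====

-- a newline-free prefix of x ++ '\n' :: y is a prefix of x
theorem pvPrefixSep {kw x y : List Char} (h : '\n' ∉ kw) (hp : kw <+: x ++ '\n' :: y) :
    kw <+: x := by
  induction x generalizing kw with
  | nil =>
    cases kw with
    | nil => exact List.nil_prefix
    | cons k t =>
      rw [List.nil_append, List.cons_prefix_cons] at hp
      exact absurd (hp.1 ▸ List.mem_cons_self) h
  | cons c x ih =>
    cases kw with
    | nil => exact List.nil_prefix
    | cons k t =>
      rw [List.cons_append, List.cons_prefix_cons] at hp
      rw [List.cons_prefix_cons]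
      exact ⟨hp.1, ih (fun hm => h (List.mem_cons_of_mem _ hm)) hp.2⟩

-- a newline-free infix of x ++ '\n' :: y lies in x or in y
theorem pvInfixSep {kw : List Char} (h : '\n' ∉ kw) (a b : List Char) :
    kw <:+: a ++ '\n' :: b ↔ kw <:+: a ∨ kw <:+: b := by
  constructor
  · intro hi
    induction a with
    | nil =>
      rw [List.nil_append] at hi
      rcases List.infix_cons_iff.mp hi with hp | hi'
      · cases kw with
        | nil => exact Or.inl (List.nil_infix)
        | cons k t =>
          rw [List.cons_prefix_cons] at hp
          exact absurd (hp.1 ▸ List.mem_cons_self) h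
      · exact Or.inr hi'
    | cons c a ih =>
      rw [List.cons_append] at hi
      rcases List.infix_cons_iff.mp hi with hp | hi'
      · exact Or.inl (pvPrefixSep h (by simpa using hp)).isInfix
      · rcases ih hi' with h1 | h2
        · exact Or.inl (List.infix_cons_iff.mpr (Or.inr h1))
        · exact Or.inr h2
  · rintro (h1 | h2)
    · exact h1.trans ⟨[], '\n' :: b, by simp⟩
    · exact h2.trans ⟨a ++ ['\n'], [], by simp⟩

-- a nonempty newline-free keyword is in the newline-joined blob iff it is in one of the parts
theorem pvIsInJoinChars (kw : List Char) (hnl : '\n' ∉ kw) (hne : kw ≠ [])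
    (parts : List (List Char)) :
    PySem.Chars.isIn kw (PySem.Chars.join ['\n'] parts)
      = parts.any (fun t => PySem.Chars.isIn kw t) := by
  induction parts with
  | nil =>
    rw [PySem.Chars.join_nil, List.any_nil, PySem.Chars.isIn_eq_false_iff]
    intro hkw
    exact hne (List.eq_nil_of_length_eq_zero (Nat.le_zero.mp (by simpa using hkw.length_le)))
  | cons p rest ih =>
    cases rest with
    | nil => simp [PySem.Chars.join_singleton]
    | cons q r =>
      rw [PySem.Chars.join_cons_cons, List.any_cons, ← ih]
      rw [Bool.eq_iff_iff, Bool.or_eq_true, PySem.Chars.isIn_iff_infix,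
          PySem.Chars.isIn_iff_infix, PySem.Chars.isIn_iff_infix]
      have hform : p ++ ['\n'] ++ PySem.Chars.join ['\n'] (q :: r)
          = p ++ '\n' :: PySem.Chars.join ['\n'] (q :: r) := by simp
      rw [hform]
      exact pvInfixSep hnl p _

-- string-level version of the previous fact
theorem pvIsInJoinStr (kw : String) (hnl : '\n' ∉ kw.toList) (hne : kw.toList ≠ [])
    (parts : List String) :
    PySem.Str.isIn kw (PySem.Str.join "\n" parts) = parts.any (fun t => PySem.Str.isIn kw t) := by
  have h1 : PySem.Str.isIn kw (PySem.Str.join "\n" parts)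
      = PySem.Chars.isIn kw.toList (PySem.Str.join "\n" parts).toList := by
    simp
  rw [h1, PySem.Str.toList_join]
  have h2 : ("\n" : String).toList = ['\n'] := by decide
  rw [h2, pvIsInJoinChars kw.toList hnl hne]
  simp [List.any_map, Function.comp_def]

-- B's parts list is the map of the normalizer over A's message list
theorem pvPartsEq (session : List (String × List (List (String × String)))) :
    pvMsgKeys.foldl
        (fun parts key => parts ++ ((PySem.Dict.mk session).getD key []).map pvMsgText) []
      = (pvAllSessionMessages session).map pvMsgText := by
  simp [pvAllSessionMessages, pvMsgKeys, List.foldl]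

-- every keyword is nonempty and newline-free
theorem pvKeywordsOk : ∀ kw ∈ pvKeywords, '\n' ∉ kw.toList ∧ kw.toList ≠ [] := by decide

-- swapping the two 'any's
theorem pvAnySwap (texts : List String) :
    pvKeywords.any (fun kw => texts.any (fun t => PySem.Str.isIn kw t))
      = texts.any (fun t => pvKeywords.any (fun kw => PySem.Str.isIn kw t)) := by
  rw [Bool.eq_iff_iff]
  simp only [List.any_eq_true]
  constructor
  · rintro ⟨kw, hk, t, ht, hin⟩
    exact ⟨t, ht, kw, hk, hin⟩
  · rintro ⟨t, ht, kw, hk, hin⟩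
    exact ⟨kw, hk, t, ht, hin⟩

-- ===== VERDICT (by name: the statement is the Claim_ definition above) =====
theorem session_has_mobility_signal_py_spec : Claim_equal_session_has_mobility_signal_py := by
  intro session _
  unfold Spec_session_has_mobility_signal_py
  unfold session_has_mobility_signal_py session_has_mobility_signal_py_alt
  show ((pvAllSessionMessages session).any
        (fun message => pvKeywords.any (fun keyword => PySem.Str.isIn keyword (pvMsgText message))))
      = pvKeywords.any (fun keyword => PySem.Str.isIn keyword (PySem.Str.join "\n"
          (pvMsgKeys.foldl
            (fun parts key => parts ++ ((PySem.Dict.mk session).getD key []).map pvMsgText) [])))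
  rw [pvPartsEq]
  have h1 : pvKeywords.any (fun keyword => PySem.Str.isIn keyword
        (PySem.Str.join "\n" ((pvAllSessionMessages session).map pvMsgText)))
      = pvKeywords.any (fun keyword =>
          ((pvAllSessionMessages session).map pvMsgText).any
            (fun t => PySem.Str.isIn keyword t)) := by
    rw [Bool.eq_iff_iff, List.any_eq_true, List.any_eq_true]
    constructor
    · rintro ⟨kw, hk, hin⟩
      refine ⟨kw, hk, ?_⟩
      rw [← pvIsInJoinStr kw (pvKeywordsOk kw hk).1 (pvKeywordsOk kw hk).2]
      exact hin
    · rintro ⟨kw, hk, hin⟩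
      refine ⟨kw, hk, ?_⟩
      rw [pvIsInJoinStr kw (pvKeywordsOk kw hk).1 (pvKeywordsOk kw hk).2]
      exact hin
  rw [h1, pvAnySwap]
  simp [List.any_map, Function.comp_def]
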